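-- pv_equiv track=rewrite | github.com/202002538/Baekjoon | 프로그래머스/3/214288. 상담원 인원/상담원 인원.py | solution
-- ===== SOURCE A (Python) =====
-- import heapq
--
-- def solution(k, n, reqs):
--     answer = 0
--     mentor = [[[[0 for _ in range(i)], 0] for i in range(n+1)] for _ in range(k+1)]
--     for r in reqs:
--         request, time, category = r
--         for i in range(1, n+1):
--             fastest_end = heapq.heappop(mentor[category][i][0])
--             if fastest_end <= request:
--                 heapq.heappush(mentor[category][i][0], request + time)
--             else:
--                 start = fastest_end - request
--                 mentor[category][i][1] += start
--                 heapq.heappush(mentor[category][i][0], fastest_end + time)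
--
--     tmp = [1 for _ in range(k+1)]
--     for i in range(n-k):
--         minus = 0
--         idx = 0
--         for j in range(1, k+1):
--             k_minus = mentor[j][tmp[j]][1] - mentor[j][tmp[j]+1][1]
--             if k_minus > minus:
--                 minus = k_minus
--                 idx = j
--         tmp[idx] += 1
--
--     for i in range(1, k+1):
--         answer += mentor[i][tmp[i]][1]
--
--     return answer
-- ===== SOURCE B (Python) =====
-- import bisect
--
-- def solution(k, n, reqs):
--     # one pass per category: bucket the requests, then simulate each category on demand
--     buckets = [[] for _ in range(k + 1)]
--     for r in reqs:
--         buckets[r[2]].append((r[0], r[1]))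
--
--     def cost(j, c):
--         # total waiting time of category j served by c counselors (sorted list of end times)
--         ends = [0] * c
--         total = 0
--         for req, t in buckets[j]:
--             e = ends[0]
--             rest = ends[1:]
--             if e <= req:
--                 new = req + t
--             else:
--                 total += e - req
--                 new = e + t
--             bisect.insort(rest, new)
--             ends = rest
--         return total
--
--     alloc = [1] * (k + 1)
--     cur = [cost(j, 1) for j in range(k + 1)]
--     nxt = [cost(j, 2) for j in range(k + 1)]
--     for _ in range(n - k):
--         best = 0
--         idx = 0
--         for j in range(1, k + 1):
--             g = cur[j] - nxt[j]
--             if g > best: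
--                 best = g
--                 idx = j
--         if idx == 0:
--             break
--         alloc[idx] += 1
--         cur[idx] = nxt[idx]
--         nxt[idx] = cost(idx, alloc[idx] + 1)
--     return sum(cur[1:])
-- ===== Notes on version B (the rewrite author's own statement) =====
-- stated objective: faster
-- what changed: A simulates a grid of n heaps per category, updating all n of them for every request, then runs a fixed n-k greedy rounds that dump no-gain rounds into a dummy slot; B buckets the requests per category once, simulates a single sorted end-time list per needed (category, count) pair on demand (one fresh simulation per greedy round, cached in cur/nxt), and breaks out of the greedy loop as soon as no reallocation reduces waiting.
-- outside the precondition, e.g. on solution(-1, -1, []): A returns 0, B returns 0; on solution(0, 0, [[1, 1, 5]]): A returns 0, B raises IndexError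
import Mathlib
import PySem

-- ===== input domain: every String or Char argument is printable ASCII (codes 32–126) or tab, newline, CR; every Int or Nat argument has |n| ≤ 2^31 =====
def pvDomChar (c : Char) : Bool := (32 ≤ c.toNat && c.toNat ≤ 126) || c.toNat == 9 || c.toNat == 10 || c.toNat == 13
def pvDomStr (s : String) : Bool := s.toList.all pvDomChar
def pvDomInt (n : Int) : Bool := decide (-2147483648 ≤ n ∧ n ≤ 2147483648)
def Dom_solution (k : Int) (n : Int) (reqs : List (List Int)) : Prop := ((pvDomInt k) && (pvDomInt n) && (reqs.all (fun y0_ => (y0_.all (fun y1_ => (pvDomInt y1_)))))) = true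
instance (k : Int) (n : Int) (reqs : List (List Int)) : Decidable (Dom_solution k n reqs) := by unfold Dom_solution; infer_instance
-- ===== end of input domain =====

-- B replaces A's grid of n heaps per category (every request updates all n of them) by
-- per-category buckets simulated on demand — one fresh simulation per greedy round —
-- and stops the greedy loop as soon as no reallocation helps (A keeps burning rounds
-- on a dummy slot).  Return-value equivalence only; A mutates nothing observable.

-- ===== PORT A =====
-- heapq heaps are modelled by their sorted element lists: heappop returns the smallest
-- element (exact: heapq's contract) and heappush inserts keeping the order (exact as a
-- multiset; on Int lists the sorted representative is unique, so this is exact).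
def pvInsortA (x : Int) (h : List Int) : List Int := List.orderedInsert (· ≤ ·) x h

-- body of A's 'for i in range(1, n+1)' loop on one (heap, waited) cell
def pvServeA (request time : Int) (cell : List Int × Int) : List Int × Int :=
  let fastest := cell.1.headD 0          -- heappop: the minimum (heap nonempty under Pre_)
  let rest := cell.1.tail
  if fastest ≤ request then (pvInsortA (request + time) rest, cell.2)
  else (pvInsortA (fastest + time) rest, cell.2 + (fastest - request))

def pvRowStepA (request time : Int) (row : List (List Int × Int)) : List (List Int × Int) :=
  row.mapIdx (fun i cell => if i = 0 then cell else pvServeA request time cell)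

def pvGridStepA (g : List (List (List Int × Int))) (r : List Int) : List (List (List Int × Int)) :=
  let request := PySem.List.pyGetD r 0 0
  let time := PySem.List.pyGetD r 1 0
  let category := PySem.List.pyGetD r 2 0
  -- mentor[category]: a negative index counts from the end (exact within Pre_'s bounds)
  let ci := if category < 0 then category + g.length else category
  g.modify ci.toNat (pvRowStepA request time)

def pvInitGrid (k n : Int) : List (List (List Int × Int)) :=
  (PySem.List.pyRange 0 (k+1) 1).map (fun _ =>
    (PySem.List.pyRange 0 (n+1) 1).map (fun i => ((List.replicate i.toNat 0 : List Int), (0:Int))))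

def pvWaitAt (g : List (List (List Int × Int))) (j c : Int) : Int :=
  (PySem.List.pyGetD (PySem.List.pyGetD g j []) c ([], 0)).2

-- A's inner 'for j in range(1, k+1)' selection of (minus, idx)
def pvPickA (g : List (List (List Int × Int))) (tmp : List Int) (k : Int) : Int × Int :=
  (PySem.List.pyRange 1 (k+1) 1).foldl (fun mi j =>
    let km := pvWaitAt g j (PySem.List.pyGetD tmp j 0) -
              pvWaitAt g j (PySem.List.pyGetD tmp j 0 + 1)
    if mi.1 < km then (km, j) else mi) (0, 0)

def pvRoundA (g : List (List (List Int × Int))) (k : Int) (tmp : List Int) : List Int :=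
  PySem.List.pySetD tmp (pvPickA g tmp k).2
    (PySem.List.pyGetD tmp (pvPickA g tmp k).2 0 + 1)

def solution (k : Int) (n : Int) (reqs : List (List Int)) : Int :=
  let mentor := reqs.foldl pvGridStepA (pvInitGrid k n)
  let tmp0 := (PySem.List.pyRange 0 (k+1) 1).map (fun _ => (1:Int))
  let tmpF := (PySem.List.pyRange 0 (n-k) 1).foldl (fun t _ => pvRoundA mentor k t) tmp0
  (PySem.List.pyRange 1 (k+1) 1).foldl
    (fun a i => a + pvWaitAt mentor i (PySem.List.pyGetD tmpF i 0)) 0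

-- ===== PORT B =====
-- bisect.insort on the sorted Int list (ties carry equal Ints: the result list is exact)
def pvInsortB (x : Int) (h : List Int) : List Int := List.orderedInsert (· ≤ ·) x h

-- body of B's 'for req, t in buckets[j]' loop in cost()
def pvServeB (st : List Int × Int) (rt : Int × Int) : List Int × Int :=
  let e := st.1.headD 0                  -- ends[0]; ends nonempty since c ≥ 1 at every call
  let rest := st.1.tail
  if e ≤ rt.1 then (pvInsortB (rt.1 + rt.2) rest, st.2)
  else (pvInsortB (e + rt.2) rest, st.2 + (e - rt.1))

def pvCost (bucket : List (Int × Int)) (c : Int) : Int :=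
  (bucket.foldl pvServeB ((List.replicate c.toNat 0 : List Int), (0:Int))).2

-- buckets[r[2]].append((r[0], r[1])): Python list indexing (negative indices wrap)
def pvBucketStep (bs : List (List (Int × Int))) (r : List Int) : List (List (Int × Int)) :=
  PySem.List.pySetD bs (PySem.List.pyGetD r 2 0)
    (PySem.List.pyGetD bs (PySem.List.pyGetD r 2 0) [] ++
      [(PySem.List.pyGetD r 0 0, PySem.List.pyGetD r 1 0)])

def pvBuckets (k : Int) (reqs : List (List Int)) : List (List (Int × Int)) :=
  reqs.foldl pvBucketStep ((PySem.List.pyRange 0 (k+1) 1).map (fun _ => []))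

def pvBucketAt (bs : List (List (Int × Int))) (j : Int) : List (Int × Int) :=
  PySem.List.pyGetD bs j []

-- B's inner 'for j in range(1, k+1)' selection of (best, idx) from the two caches
def pvPickB (cur nxt : List Int) (k : Int) : Int × Int :=
  (PySem.List.pyRange 1 (k+1) 1).foldl (fun bi j =>
    let g := PySem.List.pyGetD cur j 0 - PySem.List.pyGetD nxt j 0
    if bi.1 < g then (g, j) else bi) (0, 0)

-- B's 'for _ in range(n-k)' loop with its early break; returns the final cur list
def pvLoopB (bs : List (List (Int × Int))) (k : Int) :
    Nat → List Int → List Int → List Int → List Int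
  | 0, _, cur, _ => cur
  | m+1, alloc, cur, nxt =>
    let bi := pvPickB cur nxt k
    if bi.2 = 0 then cur
    else
      let idx := bi.2
      let alloc' := PySem.List.pySetD alloc idx (PySem.List.pyGetD alloc idx 0 + 1)
      let cur' := PySem.List.pySetD cur idx (PySem.List.pyGetD nxt idx 0)
      let nxt' := PySem.List.pySetD nxt idx
        (pvCost (pvBucketAt bs idx) (PySem.List.pyGetD alloc' idx 0 + 1))
      pvLoopB bs k m alloc' cur' nxt'

def solution_alt (k : Int) (n : Int) (reqs : List (List Int)) : Int :=
  let bs := pvBuckets k reqs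
  let alloc := PySem.List.pyRepeat [(1:Int)] (k+1)
  let cur := (PySem.List.pyRange 0 (k+1) 1).map (fun j => pvCost (pvBucketAt bs j) 1)
  let nxt := (PySem.List.pyRange 0 (k+1) 1).map (fun j => pvCost (pvBucketAt bs j) 2)
  let curF := pvLoopB bs k (n-k).toNat alloc cur nxt
  (curF.drop 1).sum

-- ===== PRECONDITION & SPEC =====
-- Pre_: k ≥ 0 categories, at least one counselor when there is a category, and every
-- request a [start, length, category] triple whose category is a valid Python index
-- into the k+1 category rows (negative ones wrap, exactly as both programs index).
-- Outside it A raises (IndexError/ValueError) except in degenerate corners where the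
-- loops never touch the tables (k < 0 with n ≤ k, or k = 0 with n ≤ 0 and a category
-- outside -1..0), on which A returns 0 without validating the input.
def Pre_solution (k : Int) (n : Int) (reqs : List (List Int)) : Prop :=
  0 ≤ k ∧ (1 ≤ k → 1 ≤ n) ∧
  ∀ r ∈ reqs, r.length = 3 ∧ -(k+1) ≤ PySem.List.pyGetD r 2 0 ∧ PySem.List.pyGetD r 2 0 ≤ k
instance (k : Int) (n : Int) (reqs : List (List Int)) : Decidable (Pre_solution k n reqs) := by
  unfold Pre_solution; infer_instance

def pvWitness_solution : Int × Int × List (List Int) :=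
  (2, 3, [[1, 5, 1], [2, 5, 2], [3, 4, 1]])

def Spec_solution (k : Int) (n : Int) (reqs : List (List Int)) (out : Int) : Prop := out = solution_alt k n reqs
instance (k : Int) (n : Int) (reqs : List (List Int)) (out : Int) : Decidable (Spec_solution k n reqs out) := by unfold Spec_solution; infer_instance

-- ===== CLAIM (what is proved, stated in full; the proofs are below) =====
def Claim_equal_solution : Prop := ∀ (k : Int) (n : Int) (reqs : List (List Int)), Dom_solution k n reqs → Pre_solution k n reqs → Spec_solution k n reqs (solution k n reqs)

-- ===== LEMMAS AND PROOFS =====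

-- the per-category request stream (categories normalised by Python's index wrap)
def pvCatN (k : Int) (r : List Int) : Int :=
  if PySem.List.pyGetD r 2 0 < 0 then PySem.List.pyGetD r 2 0 + (k+1)
  else PySem.List.pyGetD r 2 0

def pvFilt (k : Int) (reqs : List (List Int)) (j : Int) : List (Int × Int) :=
  reqs.filterMap (fun r =>
    if pvCatN k r = j then some (PySem.List.pyGetD r 0 0, PySem.List.pyGetD r 1 0)
    else none)

def pvW (k : Int) (reqs : List (List Int)) (j c : Int) : Int := pvCost (pvFilt k reqs j) c

-- Python's negative-index wrap for reads and writes
theorem pvGetD_wrap {α : Type} (xs : List α) (i : Int) (d : α)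
    (h1 : -(xs.length:Int) ≤ i) (h2 : i < 0) :
    PySem.List.pyGetD xs i d = PySem.List.pyGetD xs (i + xs.length) d := by
  unfold PySem.List.pyGetD PySem.List.pyGet? PySem.List.pyIdx?
  rw [if_neg (by omega), if_pos h1, if_pos (by omega), if_pos (by omega)]
  rw [show xs.length - (-i).toNat = (i + xs.length).toNat from by omega]

theorem pvSetD_wrap {α : Type} (xs : List α) (i : Int) (v : α)
    (h1 : -(xs.length:Int) ≤ i) (h2 : i < 0) :
    PySem.List.pySetD xs i v = PySem.List.pySetD xs (i + xs.length) v := by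
  unfold PySem.List.pySetD PySem.List.pySet? PySem.List.pyIdx?
  rw [if_neg (by omega), if_pos h1, if_pos (by omega), if_pos (by omega)]
  rw [show xs.length - (-i).toNat = (i + xs.length).toNat from by omega]

theorem pvGetD_oob {α : Type} (t : List α) (j : Int) (d : α) (h : (t.length:Int) ≤ j) :
    PySem.List.pyGetD t j d = d := by
  have hn : PySem.List.pyGet? t j = none := by
    rw [PySem.List.pyGet?_eq_none_iff]; simp [PySem.Raise.InRange]; omega
  simp [PySem.List.pyGetD, hn]

theorem pvGetD_setD {α : Type} (t : List α) (i j : Int) (v d : α) (hi : 0 ≤ i) (hj : 0 ≤ j)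
    (hil : i.toNat < t.length) :
    PySem.List.pyGetD (PySem.List.pySetD t i v) j d =
      if i = j then v else PySem.List.pyGetD t j d := by
  rw [PySem.List.pySetD_of_nonneg t v hi]
  by_cases hjl : j < (t.length : Int)
  · rw [PySem.List.pyGetD_eq_getElem _ _ hj (by simpa using hjl),
        PySem.List.pyGetD_eq_getElem _ _ hj hjl]
    rw [List.getElem_set]
    by_cases hij : i = j
    · simp [hij]
    · rw [if_neg (by omega), if_neg hij]
  · rw [pvGetD_oob _ _ _ (by simp; omega), pvGetD_oob _ _ _ (by omega)]
    rw [if_neg (by omega)]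

theorem pvServeA_eq (a b : Int) (st : List Int × Int) :
    pvServeA a b st = pvServeB st (a, b) := rfl

-- one bucket append step, read at slot j
theorem pvBucketStep_at (k : Int) (bs : List (List (Int × Int))) (r : List Int)
    (hl : bs.length = (k+1).toNat)
    (hr1 : -(k+1) ≤ PySem.List.pyGetD r 2 0) (hr2 : PySem.List.pyGetD r 2 0 ≤ k)
    (j : Int) (hj0 : 0 ≤ j) (hjk : j ≤ k) :
    PySem.List.pyGetD (pvBucketStep bs r) j [] =
      (if pvCatN k r = j
       then PySem.List.pyGetD bs j [] ++
         [(PySem.List.pyGetD r 0 0, PySem.List.pyGetD r 1 0)]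
       else PySem.List.pyGetD bs j []) := by
  have hk0 : 0 ≤ k := le_trans hj0 hjk
  have hblen : (bs.length : Int) = k + 1 := by rw [hl]; omega
  unfold pvBucketStep pvCatN
  by_cases hneg : PySem.List.pyGetD r 2 0 < 0
  · rw [pvSetD_wrap _ _ _ (by omega) hneg, pvGetD_wrap _ _ _ (by omega) hneg, hblen]
    rw [pvGetD_setD _ _ _ _ _ (by omega) hj0 (by omega)]
    rw [if_pos hneg]
    split
    · rename_i h; rw [h]
    · rfl
  · rw [pvGetD_setD _ _ _ _ _ (by omega) hj0 (by omega)]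
    rw [if_neg hneg]
    split
    · rename_i h; rw [h]
    · rfl

theorem pvBuckets_at (k : Int) :
    ∀ (reqs : List (List Int)) (bs : List (List (Int × Int))),
    bs.length = (k+1).toNat →
    (∀ r ∈ reqs, -(k+1) ≤ PySem.List.pyGetD r 2 0 ∧ PySem.List.pyGetD r 2 0 ≤ k) →
    ∀ j : Int, 0 ≤ j → j ≤ k →
    PySem.List.pyGetD (reqs.foldl pvBucketStep bs) j [] =
      PySem.List.pyGetD bs j [] ++ pvFilt k reqs j := by
  intro reqs
  induction reqs with
  | nil => intro bs _ _ j _ _; simp [pvFilt]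
  | cons r rs ih =>
    intro bs hl hreq j hj0 hjk
    have hr := hreq r (by simp)
    have hl' : (pvBucketStep bs r).length = (k+1).toNat := by
      unfold pvBucketStep
      by_cases hneg : PySem.List.pyGetD r 2 0 < 0
      · rw [pvSetD_wrap _ _ _ (by omega) hneg,
            PySem.List.pySetD_of_nonneg _ _ (by omega), List.length_set, hl]
      · rw [PySem.List.pySetD_of_nonneg _ _ (by omega), List.length_set, hl]
    simp only [List.foldl_cons]
    rw [ih (pvBucketStep bs r) hl' (fun x hx => hreq x (List.mem_cons_of_mem _ hx)) j hj0 hjk]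
    rw [pvBucketStep_at k bs r hl hr.1 hr.2 j hj0 hjk]
    by_cases hcj : pvCatN k r = j
    · rw [if_pos hcj]
      have hf : pvFilt k (r :: rs) j =
          (PySem.List.pyGetD r 0 0, PySem.List.pyGetD r 1 0) :: pvFilt k rs j := by
        simp [pvFilt, hcj]
      rw [hf]
      simp
    · rw [if_neg hcj]
      have hf : pvFilt k (r :: rs) j = pvFilt k rs j := by
        simp [pvFilt, hcj]
      rw [hf]

theorem pvBucketAt_eq (k : Int) (reqs : List (List Int))
    (hreq : ∀ r ∈ reqs, -(k+1) ≤ PySem.List.pyGetD r 2 0 ∧ PySem.List.pyGetD r 2 0 ≤ k)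
    (j : Int) (h0 : 0 ≤ j) (h1 : j ≤ k) :
    pvBucketAt (pvBuckets k reqs) j = pvFilt k reqs j := by
  unfold pvBucketAt pvBuckets
  rw [pvBuckets_at k reqs _ (by simp [PySem.List.length_pyRange_one]) hreq j h0 h1]
  rw [PySem.List.pyGetD_map_pyRange_of_nonneg _ _ _ _ h0 (by omega)]
  rfl

-- one grid step, read at cell (j, c), c ≥ 1
theorem pvGridStepA_cell (k n : Int) (g : List (List (List Int × Int))) (r : List Int)
    (hg : g.length = (k+1).toNat) (hrow : ∀ row ∈ g, row.length = (n+1).toNat)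
    (hr1 : -(k+1) ≤ PySem.List.pyGetD r 2 0) (hr2 : PySem.List.pyGetD r 2 0 ≤ k)
    (j c : Int) (hj0 : 0 ≤ j) (hjk : j ≤ k) (hc1 : 1 ≤ c) (hcn : c ≤ n) :
    (PySem.List.pyGetD (PySem.List.pyGetD (pvGridStepA g r) j []) c ([], 0)) =
      (if pvCatN k r = j
       then pvServeB (PySem.List.pyGetD (PySem.List.pyGetD g j []) c ([], 0))
              (PySem.List.pyGetD r 0 0, PySem.List.pyGetD r 1 0)
       else PySem.List.pyGetD (PySem.List.pyGetD g j []) c ([], 0)) := by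
  have hk0 : 0 ≤ k := le_trans hj0 hjk
  have hglen : (g.length : Int) = k + 1 := by rw [hg]; omega
  have hcatn : 0 ≤ pvCatN k r ∧ pvCatN k r ≤ k := by
    unfold pvCatN; split <;> omega
  unfold pvGridStepA pvRowStepA
  simp only [hglen]
  rw [show (if PySem.List.pyGetD r 2 0 < 0 then PySem.List.pyGetD r 2 0 + (k+1)
      else PySem.List.pyGetD r 2 0) = pvCatN k r from rfl]
  rw [PySem.List.pyGetD_eq_getElem _ _ hj0 (by rw [List.length_modify]; omega)]
  rw [PySem.List.pyGetD_eq_getElem g _ hj0 (by omega)]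
  rw [List.getElem_modify]
  have hrowlen : ∀ (h : j.toNat < g.length), ((g[j.toNat]'h).length : Int) = n + 1 := by
    intro h; rw [hrow _ (List.getElem_mem _)]; omega
  by_cases hcj : pvCatN k r = j
  · rw [if_pos (by omega), if_pos hcj]
    rw [PySem.List.pyGetD_eq_getElem _ _ (by omega) (by rw [List.length_mapIdx, hrowlen _]; omega)]
    rw [List.getElem_mapIdx]
    rw [if_neg (by omega)]
    rw [pvServeA_eq]
    congr 1
    exact (PySem.List.pyGetD_eq_getElem _ _ (by omega) (by rw [hrowlen _]; omega)).symm
  · rw [if_neg (by omega), if_neg hcj]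

theorem pvGrid_fold (k n : Int) :
    ∀ (reqs : List (List Int)) (g : List (List (List Int × Int))),
    g.length = (k+1).toNat → (∀ row ∈ g, row.length = (n+1).toNat) →
    (∀ r ∈ reqs, -(k+1) ≤ PySem.List.pyGetD r 2 0 ∧ PySem.List.pyGetD r 2 0 ≤ k) →
    ∀ j c : Int, 0 ≤ j → j ≤ k → 1 ≤ c → c ≤ n →
    PySem.List.pyGetD (PySem.List.pyGetD (reqs.foldl pvGridStepA g) j []) c ([], 0) =
      (pvFilt k reqs j).foldl pvServeB
        (PySem.List.pyGetD (PySem.List.pyGetD g j []) c ([], 0)) := by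
  intro reqs
  induction reqs with
  | nil => intro g _ _ _ j c _ _ _ _; simp [pvFilt]
  | cons r rs ih =>
    intro g hg hrow hreq j c hj0 hjk hc1 hcn
    have hr := hreq r (by simp)
    have hstep := pvGridStepA_cell k n g r hg hrow hr.1 hr.2 j c hj0 hjk hc1 hcn
    have hg' : (pvGridStepA g r).length = (k+1).toNat := by
      simp [pvGridStepA, List.length_modify, hg]
    have hrow' : ∀ row ∈ pvGridStepA g r, row.length = (n+1).toNat := by
      intro row hrowmem
      unfold pvGridStepA at hrowmem
      obtain ⟨m, hm, hrw⟩ := List.getElem_of_mem hrowmem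
      rw [List.getElem_modify] at hrw
      subst hrw
      split <;> split <;>
        first
          | (simp only [pvRowStepA, List.length_mapIdx]; exact hrow _ (List.getElem_mem _))
          | exact hrow _ (List.getElem_mem _)
    simp only [List.foldl_cons]
    rw [ih (pvGridStepA g r) hg' hrow' (fun x hx => hreq x (List.mem_cons_of_mem _ hx))
        j c hj0 hjk hc1 hcn]
    rw [hstep]
    by_cases hcj : pvCatN k r = j
    · rw [if_pos hcj]
      have hf : pvFilt k (r :: rs) j =
          (PySem.List.pyGetD r 0 0, PySem.List.pyGetD r 1 0) :: pvFilt k rs j := by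
        simp [pvFilt, hcj]
      rw [hf, List.foldl_cons]
    · rw [if_neg hcj]
      have hf : pvFilt k (r :: rs) j = pvFilt k rs j := by
        simp [pvFilt, hcj]
      rw [hf]

theorem pvInit_cell (k n : Int) (j c : Int) (hj0 : 0 ≤ j) (hjk : j ≤ k)
    (hc0 : 0 ≤ c) (hcn : c ≤ n) :
    PySem.List.pyGetD (PySem.List.pyGetD (pvInitGrid k n) j []) c ([], 0) =
      ((List.replicate c.toNat 0 : List Int), (0:Int)) := by
  unfold pvInitGrid
  rw [PySem.List.pyGetD_map_pyRange_of_nonneg _ _ _ _ hj0 (by omega),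
      PySem.List.pyGetD_map_pyRange_of_nonneg _ _ _ _ hc0 (by omega)]

-- master simulation lemma: A's grid cell waiting time is B's cost function
theorem pvWaitAt_eq (k n : Int) (reqs : List (List Int))
    (hreq : ∀ r ∈ reqs, -(k+1) ≤ PySem.List.pyGetD r 2 0 ∧ PySem.List.pyGetD r 2 0 ≤ k)
    (j c : Int) (hj0 : 0 ≤ j) (hjk : j ≤ k) (hc1 : 1 ≤ c) (hcn : c ≤ n) :
    pvWaitAt (reqs.foldl pvGridStepA (pvInitGrid k n)) j c = pvW k reqs j c := by
  unfold pvWaitAt pvW pvCost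
  rw [pvGrid_fold k n reqs (pvInitGrid k n)
      (by simp [pvInitGrid, PySem.List.length_pyRange_one])
      (by
        intro row hm
        simp only [pvInitGrid, List.mem_map] at hm
        obtain ⟨_, _, rfl⟩ := hm
        simp [PySem.List.length_pyRange_one])
      hreq j c hj0 hjk hc1 hcn]
  rw [pvInit_cell k n j c hj0 hjk (by omega) (by omega)]

theorem pvAt_oob (t : List Int) (j : Int) (h : (t.length:Int) ≤ j) :
    PySem.List.pyGetD t j 0 = 0 := by
  have hn : PySem.List.pyGet? t j = none := by
    rw [PySem.List.pyGet?_eq_none_iff]; simp [PySem.Raise.InRange]; omega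
  simp [PySem.List.pyGetD, hn]

-- the selection fold returns its initial index or a member of the range
theorem pvPick_mem (f : Int → Int) (l : List Int) (init : Int × Int) :
    (l.foldl (fun mi j => if mi.1 < f j then (f j, j) else mi) init).2 = init.2 ∨
    (l.foldl (fun mi j => if mi.1 < f j then (f j, j) else mi) init).2 ∈ l := by
  induction l generalizing init with
  | nil => exact Or.inl rfl
  | cons x t ih =>
    simp only [List.foldl_cons]
    by_cases hx : init.1 < f x
    · simp only [if_pos hx]
      rcases ih (f x, x) with h | h
      · exact Or.inr (by simp [h])
      · exact Or.inr (List.mem_cons_of_mem _ h)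
    · simp only [if_neg hx]
      rcases ih init with h | h
      · exact Or.inl h
      · exact Or.inr (List.mem_cons_of_mem _ h)

-- entry read/write helpers
theorem pvAt_set (t : List Int) (i j v : Int) (hi : 0 ≤ i) (hj : 0 ≤ j)
    (hil : i.toNat < t.length) :
    PySem.List.pyGetD (PySem.List.pySetD t i v) j 0 =
      if i = j then v else PySem.List.pyGetD t j 0 := by
  rw [PySem.List.pySetD_of_nonneg t v hi]
  by_cases hjl : j < (t.length : Int)
  · rw [PySem.List.pyGetD_eq_getElem _ _ hj (by simpa using hjl),
        PySem.List.pyGetD_eq_getElem _ _ hj hjl]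
    rw [List.getElem_set]
    by_cases hij : i = j
    · simp [hij]
    · rw [if_neg (by omega), if_neg hij]
  · rw [pvAt_oob _ _ (by simp; omega), pvAt_oob _ _ (by omega)]
    rw [if_neg (by omega)]

-- proof-side shorthand for a Python list read t[j] with default 0
def pvAt (t : List Int) (j : Int) : Int := PySem.List.pyGetD t j 0

theorem pvAt_set0 (t : List Int) (v : Int) (j : Int) (hj : 1 ≤ j) :
    pvAt (PySem.List.pySetD t 0 v) j = pvAt t j := by
  by_cases hl : 0 < t.length
  · unfold pvAt
    rw [pvAt_set t 0 j v le_rfl (by omega) (by simpa using hl)]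
    rw [if_neg (by omega)]
  · have : t = [] := List.eq_nil_of_length_eq_zero (by omega)
    subst this; rfl

-- A's selection fold only reads tmp[1..k]
theorem pvPickA_congr (g : List (List (List Int × Int))) (k : Int) (t tmp : List Int)
    (h : ∀ j : Int, 1 ≤ j → j ≤ k → pvAt t j = pvAt tmp j) :
    pvPickA g t k = pvPickA g tmp k := by
  unfold pvPickA
  apply PySem.List.foldl_congr_mem
  intro acc x hx
  rw [PySem.List.mem_pyRange_one] at hx
  have := h x hx.1 (by omega)
  unfold pvAt at this
  simp only [this]

-- once a round selects the dummy index 0, every later round does too and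
-- tmp[1..k] never changes again
theorem pvStable (g : List (List (List Int × Int))) (k : Int) (tmp : List Int)
    (h0 : (pvPickA g tmp k).2 = 0) :
    ∀ (l : List Int) (t : List Int),
    (∀ j : Int, 1 ≤ j → j ≤ k → pvAt t j = pvAt tmp j) →
    ∀ j : Int, 1 ≤ j → j ≤ k →
      pvAt (l.foldl (fun t _ => pvRoundA g k t) t) j = pvAt tmp j := by
  intro l
  induction l with
  | nil => intro t ht j hj1 hjk; exact ht j hj1 hjk
  | cons e l' ih =>
    intro t ht j hj1 hjk
    simp only [List.foldl_cons]
    refine ih _ ?_ j hj1 hjk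
    intro j' hj1' hjk'
    have hpk : pvPickA g t k = pvPickA g tmp k := pvPickA_congr g k t tmp ht
    unfold pvRoundA
    rw [hpk, h0]
    rw [pvAt_set0 _ _ _ hj1']
    exact ht j' hj1' hjk'

-- sum(cur[1:]) as the range-fold A's last loop performs
theorem pvDropMap (c : List Int) :
    (PySem.List.pyRange 1 (c.length : Int) 1).map (fun j => pvAt c j) = c.drop 1 := by
  apply List.ext_getElem
  · simp only [List.length_map, PySem.List.length_pyRange_one, List.length_drop]
    omega
  · intro i h1 h2
    simp only [List.length_map, PySem.List.length_pyRange_one] at h1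
    rw [List.getElem_map, PySem.List.getElem_pyRange_one]
    unfold pvAt
    rw [PySem.List.pyGetD_eq_getElem _ _ (by omega) (by omega)]
    rw [List.getElem_drop]
    simp only [show (1 + (i:Int)).toNat = 1 + i from by omega]

theorem pvCurSum (k : Int) (hk : 0 ≤ k) (cur : List Int)
    (hlen : cur.length = (k+1).toNat) (F : Int → Int)
    (h : ∀ j : Int, 1 ≤ j → j ≤ k → F j = pvAt cur j) :
    (cur.drop 1).sum = (PySem.List.pyRange 1 (k+1) 1).foldl (fun a i => a + F i) 0 := by
  rw [PySem.List.foldl_add]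
  have hrange : (PySem.List.pyRange 1 (k+1) 1).map F =
      (PySem.List.pyRange 1 (k+1) 1).map (fun j => pvAt cur j) := by
    apply List.map_congr_left
    intro x hx
    rw [PySem.List.mem_pyRange_one] at hx
    exact h x hx.1 (by omega)
  rw [hrange]
  have hlen' : ((cur.length : Int)) = k + 1 := by omega
  rw [← hlen', pvDropMap]
  omega

-- the main greedy induction: A's dummy-slot rounds against B's cached early-exit loop
theorem pvMain (g : List (List (List Int × Int))) (bs : List (List (Int × Int)))
    (k n : Int) (reqs : List (List Int)) (hk : 0 ≤ k)
    (hW : ∀ j c : Int, 1 ≤ j → j ≤ k → 1 ≤ c → c ≤ n → pvWaitAt g j c = pvW k reqs j c)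
    (hB : ∀ j : Int, 1 ≤ j → j ≤ k → pvBucketAt bs j = pvFilt k reqs j) :
    ∀ (l : List Int) (tmp alloc cur nxt : List Int),
    tmp.length = (k+1).toNat → alloc.length = (k+1).toNat →
    cur.length = (k+1).toNat → nxt.length = (k+1).toNat →
    (∀ j : Int, 1 ≤ j → j ≤ k →
      pvAt tmp j = pvAt alloc j ∧
      pvAt cur j = pvW k reqs j (pvAt tmp j) ∧
      pvAt nxt j = pvW k reqs j (pvAt tmp j + 1) ∧
      1 ≤ pvAt tmp j ∧ pvAt tmp j + l.length ≤ n) →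
    ((pvLoopB bs k l.length alloc cur nxt).drop 1).sum =
      (PySem.List.pyRange 1 (k+1) 1).foldl
        (fun a i => a + pvWaitAt g i
          (PySem.List.pyGetD (l.foldl (fun t _ => pvRoundA g k t) tmp) i 0)) 0 := by
  intro l
  induction l with
  | nil =>
    intro tmp alloc cur nxt htl hal hcl hnl hinv
    simp only [List.length_nil, List.foldl_nil, pvLoopB]
    apply pvCurSum k hk cur hcl
    intro j hj1 hjk
    obtain ⟨-, hcur, -, ht1, htn⟩ := hinv j hj1 hjk
    show pvWaitAt g j (pvAt tmp j) = pvAt cur j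
    rw [hW j _ hj1 hjk ht1 (by simpa using htn), hcur]
  | cons e l' ih =>
    intro tmp alloc cur nxt htl hal hcl hnl hinv
    have hpk : pvPickB cur nxt k = pvPickA g tmp k := by
      unfold pvPickB pvPickA
      apply PySem.List.foldl_congr_mem
      intro acc x hx
      rw [PySem.List.mem_pyRange_one] at hx
      obtain ⟨-, hcur, hnxt, ht1, htn⟩ := hinv x hx.1 (by omega)
      have hW1 : pvWaitAt g x (pvAt tmp x) = pvW k reqs x (pvAt tmp x) := by
        apply hW x _ hx.1 (by omega) ht1
        simp only [List.length_cons] at htn; omega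
      have hW2 : pvWaitAt g x (pvAt tmp x + 1) = pvW k reqs x (pvAt tmp x + 1) := by
        apply hW x _ hx.1 (by omega) (by omega)
        simp only [List.length_cons] at htn; omega
      unfold pvAt at hcur hnxt hW1 hW2
      simp only [hcur, hnxt, ← hW1, ← hW2]
    have hmem : (pvPickA g tmp k).2 = 0 ∨ (pvPickA g tmp k).2 ∈ PySem.List.pyRange 1 (k+1) 1 := by
      unfold pvPickA
      exact pvPick_mem _ _ _
    simp only [List.length_cons, List.foldl_cons]
    rcases hmem with hz | hm
    · -- the dummy slot: B stops, A burns the remaining rounds on tmp[0]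
      have hBstop : pvLoopB bs k (l'.length + 1) alloc cur nxt = cur := by
        simp only [pvLoopB]
        rw [hpk, hz]
        simp
      rw [hBstop]
      have hA : ∀ j : Int, 1 ≤ j → j ≤ k →
          pvAt (l'.foldl (fun t _ => pvRoundA g k t) (pvRoundA g k tmp)) j = pvAt tmp j := by
        intro j hj1 hjk
        refine pvStable g k tmp hz l' _ ?_ j hj1 hjk
        intro j' hj1' hjk'
        unfold pvRoundA
        rw [hz, pvAt_set0 _ _ _ hj1']
      unfold pvAt at hA
      apply pvCurSum k hk cur hcl
      intro j hj1 hjk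
      obtain ⟨-, hcur, -, ht1, htn⟩ := hinv j hj1 hjk
      show pvWaitAt g j _ = pvAt cur j
      rw [hA j hj1 hjk]
      unfold pvAt at hcur ht1 htn ⊢
      rw [hW j _ hj1 hjk ht1 (by simp only [List.length_cons] at htn; omega), hcur]
    · -- a real reallocation: both sides move one counselor to idx
      rw [PySem.List.mem_pyRange_one] at hm
      set idx := (pvPickA g tmp k).2 with hidx
      have hidx1 : 1 ≤ idx := hm.1
      have hidxk : idx ≤ k := by omega
      have hidxnz : idx ≠ 0 := by omega
      obtain ⟨hta, hcur, hnxt, ht1, htn⟩ := hinv idx hidx1 hidxk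
      have hstep : pvLoopB bs k (l'.length + 1) alloc cur nxt =
          pvLoopB bs k l'.length
            (PySem.List.pySetD alloc idx (PySem.List.pyGetD alloc idx 0 + 1))
            (PySem.List.pySetD cur idx (PySem.List.pyGetD nxt idx 0))
            (PySem.List.pySetD nxt idx
              (pvCost (pvBucketAt bs idx)
                (PySem.List.pyGetD
                  (PySem.List.pySetD alloc idx (PySem.List.pyGetD alloc idx 0 + 1)) idx 0 + 1))) := by
        simp only [pvLoopB]
        rw [hpk]
        rw [← hidx, if_neg hidxnz]
      rw [hstep]
      have hround : pvRoundA g k tmp =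
          PySem.List.pySetD tmp idx (PySem.List.pyGetD tmp idx 0 + 1) := by
        unfold pvRoundA
        rw [← hidx]
      rw [hround]
      have hidxlt : idx.toNat < (k+1).toNat := by omega
      have halloc' : PySem.List.pyGetD
          (PySem.List.pySetD alloc idx (PySem.List.pyGetD alloc idx 0 + 1)) idx 0 =
          pvAt tmp idx + 1 := by
        show pvAt _ idx = _
        unfold pvAt
        rw [pvAt_set alloc idx idx _ (by omega) (by omega) (by omega)]
        rw [if_pos rfl]
        unfold pvAt at hta
        rw [← hta]
      apply ih
      · rw [PySem.List.pySetD_of_nonneg _ _ (by omega), List.length_set, htl]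
      · rw [PySem.List.pySetD_of_nonneg _ _ (by omega), List.length_set, hal]
      · rw [PySem.List.pySetD_of_nonneg _ _ (by omega), List.length_set, hcl]
      · rw [PySem.List.pySetD_of_nonneg _ _ (by omega), List.length_set, hnl]
      · intro j hj1 hjk
        obtain ⟨htaj, hcurj, hnxtj, ht1j, htnj⟩ := hinv j hj1 hjk
        have hts : pvAt (PySem.List.pySetD tmp idx (PySem.List.pyGetD tmp idx 0 + 1)) j =
            if idx = j then pvAt tmp idx + 1 else pvAt tmp j := by
          unfold pvAt
          exact pvAt_set tmp idx j _ (by omega) (by omega) (by omega)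
        have has : pvAt (PySem.List.pySetD alloc idx (PySem.List.pyGetD alloc idx 0 + 1)) j =
            if idx = j then pvAt tmp idx + 1 else pvAt alloc j := by
          unfold pvAt
          rw [pvAt_set alloc idx j _ (by omega) (by omega) (by omega)]
          unfold pvAt at hta
          rw [← hta]
        have hcs : pvAt (PySem.List.pySetD cur idx (PySem.List.pyGetD nxt idx 0)) j =
            if idx = j then pvAt nxt idx else pvAt cur j := by
          unfold pvAt
          exact pvAt_set cur idx j _ (by omega) (by omega) (by omega)
        have hns : pvAt (PySem.List.pySetD nxt idx
              (pvCost (pvBucketAt bs idx)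
                (PySem.List.pyGetD
                  (PySem.List.pySetD alloc idx (PySem.List.pyGetD alloc idx 0 + 1)) idx 0 + 1))) j =
            if idx = j then pvCost (pvBucketAt bs idx) (pvAt tmp idx + 1 + 1) else pvAt nxt j := by
          unfold pvAt
          rw [pvAt_set nxt idx j _ (by omega) (by omega) (by omega), halloc']
          rfl
        by_cases hij : idx = j
        · subst hij
          rw [hts, has, hcs, hns]
          simp only [if_pos rfl]
          refine ⟨rfl, ?_, ?_, by omega, ?_⟩
          · exact hnxt
          · rw [hB idx hidx1 hidxk]; rfl
          · simp only [List.length_cons] at htn; omega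
        · rw [hts, has, hcs, hns]
          simp only [if_neg hij]
          refine ⟨htaj, hcurj, hnxtj, ht1j, ?_⟩
          simp only [List.length_cons] at htnj; omega

-- ===== VERDICT (by name: the statement is the Claim_ definition above) =====
theorem solution_spec : Claim_equal_solution := by
  intro k n reqs _ hpre
  obtain ⟨hk, hkn, hreq⟩ := hpre
  unfold Spec_solution solution solution_alt
  have hW : ∀ j c : Int, 1 ≤ j → j ≤ k → 1 ≤ c → c ≤ n →
      pvWaitAt (reqs.foldl pvGridStepA (pvInitGrid k n)) j c = pvW k reqs j c :=
    fun j c hj1 hjk hc1 hcn =>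
      pvWaitAt_eq k n reqs (fun r hr => ⟨(hreq r hr).2.1, (hreq r hr).2.2⟩) j c
        (by omega) hjk hc1 hcn
  have hB : ∀ j : Int, 1 ≤ j → j ≤ k → pvBucketAt (pvBuckets k reqs) j = pvFilt k reqs j :=
    fun j hj1 hjk =>
      pvBucketAt_eq k reqs (fun r hr => ⟨(hreq r hr).2.1, (hreq r hr).2.2⟩) j (by omega) hjk
  have hlen0 : ((PySem.List.pyRange 0 (k+1) 1).map (fun _ => (1:Int))).length = (k+1).toNat := by
    simp [PySem.List.length_pyRange_one]
  have hmain := pvMain (reqs.foldl pvGridStepA (pvInitGrid k n)) (pvBuckets k reqs)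
    k n reqs hk hW hB (PySem.List.pyRange 0 (n-k) 1)
    ((PySem.List.pyRange 0 (k+1) 1).map (fun _ => (1:Int)))
    (PySem.List.pyRepeat [(1:Int)] (k+1))
    ((PySem.List.pyRange 0 (k+1) 1).map (fun j => pvCost (pvBucketAt (pvBuckets k reqs) j) 1))
    ((PySem.List.pyRange 0 (k+1) 1).map (fun j => pvCost (pvBucketAt (pvBuckets k reqs) j) 2))
    hlen0
    (by rw [PySem.List.pyRepeat_singleton]; simp)
    (by simp [PySem.List.length_pyRange_one])
    (by simp [PySem.List.length_pyRange_one])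
    (by
      intro j hj1 hjk
      have hj0 : 0 ≤ j := by omega
      have hjlt : j < k + 1 := by omega
      have htmp : pvAt ((PySem.List.pyRange 0 (k+1) 1).map (fun _ => (1:Int))) j = 1 := by
        unfold pvAt
        rw [PySem.List.pyGetD_map_pyRange_of_nonneg _ _ _ _ hj0 hjlt]
      have halloc : pvAt (PySem.List.pyRepeat [(1:Int)] (k+1)) j = 1 := by
        unfold pvAt
        rw [PySem.List.pyRepeat_singleton]
        rw [PySem.List.pyGetD_eq_getElem _ _ hj0 (by simp; omega)]
        simp
      have hcur : pvAt ((PySem.List.pyRange 0 (k+1) 1).map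
            (fun j => pvCost (pvBucketAt (pvBuckets k reqs) j) 1)) j =
          pvW k reqs j 1 := by
        unfold pvAt
        rw [PySem.List.pyGetD_map_pyRange_of_nonneg _ _ _ _ hj0 hjlt]
        rw [hB j hj1 hjk]; rfl
      have hnxt : pvAt ((PySem.List.pyRange 0 (k+1) 1).map
            (fun j => pvCost (pvBucketAt (pvBuckets k reqs) j) 2)) j =
          pvW k reqs j 2 := by
        unfold pvAt
        rw [PySem.List.pyGetD_map_pyRange_of_nonneg _ _ _ _ hj0 hjlt]
        rw [hB j hj1 hjk]; rfl
      rw [htmp, halloc, hcur, hnxt]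
      refine ⟨rfl, rfl, by norm_num, le_rfl, ?_⟩
      have hn1 : 1 ≤ n := hkn (by omega)
      rw [PySem.List.length_pyRange_one]
      omega)
  rw [PySem.List.length_pyRange_one] at hmain
  simp only [sub_zero] at hmain
  exact hmain.symm
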